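-- pv_equiv track=rewrite | github.com/dbwls99706/practice | 프로그래머스/0/181867. x 사이의 개수/x 사이의 개수.py | solution
-- ===== SOURCE A (Python) =====
-- def solution(myString):
--     answer = [0]
--     n=0
--     for str in myString:
--         if str == 'x':
--             n+=1
--             answer.append(0)
--         else:
--             answer[n]+=1
--     return answer
-- ===== SOURCE B (Python) =====
-- def solution(myString):
--     return [len(s) for s in myString.split('x')]
-- ===== Notes on version B (the rewrite author's own statement) =====
-- stated objective: idiomatic
-- what changed: Replaces the running per-segment counter with an indexed mutable list by splitting the string on the separator and mapping len over the segments, moving the per-character work into C-level str.split.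
import Mathlib
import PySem

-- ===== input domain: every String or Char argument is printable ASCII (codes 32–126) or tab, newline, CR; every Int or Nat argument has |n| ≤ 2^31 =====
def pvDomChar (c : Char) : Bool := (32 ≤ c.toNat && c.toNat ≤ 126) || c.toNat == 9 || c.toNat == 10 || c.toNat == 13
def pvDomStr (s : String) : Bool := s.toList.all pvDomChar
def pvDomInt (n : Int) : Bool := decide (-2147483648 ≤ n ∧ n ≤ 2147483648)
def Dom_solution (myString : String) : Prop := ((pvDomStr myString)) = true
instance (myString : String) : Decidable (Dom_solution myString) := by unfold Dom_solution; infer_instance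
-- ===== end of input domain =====

-- B replaces A's running per-segment counter (mutable list + index) with split-on-'x' then map len (idiomatic).

-- ===== PORT A =====
-- the for-loop of A: state is the answer list and the index n of the segment being counted
def solutionGo : List Char → List Int → Nat → List Int
  | [], answer, _ => answer
  | c :: rest, answer, n =>
    if c = 'x' then solutionGo rest (answer ++ [0]) (n + 1)
    else solutionGo rest (answer.modify n (· + 1)) n   -- answer[n] += 1 (n is always in range)

def solution (myString : String) : List Int :=
  solutionGo myString.toList [0] 0

-- ===== PORT B =====
def solution_alt (myString : String) : List Int :=
  (PySem.Chars.splitOn myString.toList "x".toList).map (fun s => (PySem.Chars.len s : Int))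

-- ===== PRECONDITION & SPEC =====
def Spec_solution (myString : String) (out : List Int) : Prop := out = solution_alt myString
instance (myString : String) (out : List Int) : Decidable (Spec_solution myString out) := by unfold Spec_solution; infer_instance

-- ===== CLAIM (what is proved, stated in full; the proofs are below) =====
def Claim_equal_solution : Prop := ∀ (myString : String), Dom_solution myString → Spec_solution myString (solution myString)

-- ===== LEMMAS AND PROOFS =====

-- reference splitter: split cs on 'x', with cur the (reversed) chars of the current segment
def mySplit : List Char → List Char → List (List Char)
  | [], cur => [cur.reverse]
  | c :: rest, cur =>
    if c = 'x' then cur.reverse :: mySplit rest []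
    else mySplit rest (c :: cur)

-- A's loop, with only the current segment's count carried
def myCounts : List Char → Int → List Int
  | [], k => [k]
  | c :: rest, k =>
    if c = 'x' then k :: myCounts rest 0
    else myCounts rest (k + 1)

lemma modify_append_last (done : List Int) (k : Int) :
    (done ++ [k]).modify done.length (· + 1) = done ++ [k + 1] := by
  induction done with
  | nil => simp [List.modify]
  | cons d ds ih => simp [List.modify] at ih ⊢; exact ih

lemma solutionGo_eq_myCounts (cs : List Char) :
    ∀ (done : List Int) (k : Int),
      solutionGo cs (done ++ [k]) done.length = done ++ myCounts cs k := by
  induction cs with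
  | nil => intro done k; simp [solutionGo, myCounts]
  | cons c rest ih =>
    intro done k
    by_cases h : c = 'x'
    · have := ih (done ++ [k]) 0
      simp [solutionGo, myCounts, h] at this ⊢
      simpa using this
    · simp [solutionGo, myCounts, h, modify_append_last, ih done (k + 1)]

lemma myCounts_eq_map_len (cs : List Char) :
    ∀ (cur : List Char), myCounts cs (cur.length : Int) =
      (mySplit cs cur).map (fun s => (PySem.Chars.len s : Int)) := by
  induction cs with
  | nil => intro cur; simp [myCounts, mySplit, PySem.Chars.len]
  | cons c rest ih =>
    intro cur
    by_cases h : c = 'x'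
    · have := ih []
      simp [myCounts, mySplit, h, PySem.Chars.len] at this ⊢
      simpa using this
    · simp only [myCounts, mySplit, if_neg h]
      have hk : (cur.length : Int) + 1 = ((c :: cur).length : Int) := by simp
      rw [hk]; exact ih (c :: cur)

lemma splitOnGo_eq_mySplit (fuel : Nat) :
    ∀ (l cur : List Char) (acc : List (List Char)), l.length < fuel →
      PySem.Chars.splitOn.go "x".toList fuel l cur acc = acc.reverse ++ mySplit l cur := by
  induction fuel with
  | zero => intro l cur acc h; omega
  | succ f ih =>
    intro l cur acc h
    cases l with
    | nil => simp [PySem.Chars.splitOn.go, mySplit]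
    | cons c rest =>
      by_cases hc : c = 'x'
      · have hp : ("x".toList).isPrefixOf (c :: rest) = true := by
          simp [List.isPrefixOf, hc]
        rw [PySem.Chars.splitOn.go]
        simp only [hp, if_pos]
        rw [ih]
        · simp [mySplit, hc]
        · simp at h ⊢; omega
      · have hp : ("x".toList).isPrefixOf (c :: rest) = false := by
          simp [List.isPrefixOf]
          exact fun e => hc e.symm
        rw [PySem.Chars.splitOn.go]
        simp only [hp]
        rw [if_neg (by simp)]
        rw [ih]
        · simp [mySplit, hc]
        · simp at h ⊢; omega

lemma splitOn_eq_mySplit (cs : List Char) :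
    PySem.Chars.splitOn cs "x".toList = mySplit cs [] := by
  unfold PySem.Chars.splitOn
  rw [splitOnGo_eq_mySplit (cs.length + 1) cs [] [] (by omega)]
  simp

-- ===== VERDICT (by name: the statement is the Claim_ definition above) =====
theorem solution_spec : Claim_equal_solution := by
  intro myString _
  unfold Spec_solution solution solution_alt
  rw [splitOn_eq_mySplit]
  have h1 := solutionGo_eq_myCounts myString.toList [] 0
  have h2 := myCounts_eq_map_len myString.toList []
  simp at h1 h2
  rw [h1, h2]
  simp [PySem.Chars.len]
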